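-- pv_equiv track=rewrite | github.com/GusEllerm/scholarly-outcome-prediction | src/scholarly_outcome_prediction/features/targets.py | compute_calendar_horizon_target
-- ===== SOURCE A (Python) =====
-- def compute_calendar_horizon_target(
--     publication_year: int | None,
--     counts_by_year: dict[int, int],
--     horizon_years: int,
--     include_publication_year: bool,
-- ) -> int | None:
--     """
--     Sum citations over a calendar-year horizon.
--
--     If include_publication_year is True and horizon_years is 2:
--         years = [Y, Y+1, Y+2]
--     If include_publication_year is False and horizon_years is 2:
--         years = [Y+1, Y+2]
--
--     counts_by_year null/empty is explicitly treated as a zero yearly-count series: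
--     each year in the window contributes 0, so the returned target is 0 (not None).
--     Returns None only when publication_year is None or horizon_years < 1.
--     Years absent from counts_by_year contribute 0 (partial data may undercount).
--     """
--     if publication_year is None or horizon_years < 1:
--         return None
--     start = publication_year if include_publication_year else publication_year + 1
--     end = publication_year + horizon_years
--     total = 0
--     for y in range(start, end + 1):
--         total += counts_by_year.get(y, 0)
--     return total
-- ===== SOURCE B (Python) =====
-- def compute_calendar_horizon_target(
--     publication_year,
--     counts_by_year,
--     horizon_years,
--     include_publication_year,
-- ):
--     if publication_year is None or horizon_years < 1:
--         return None
--     lo = publication_year + (0 if include_publication_year else 1)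
--     hi = publication_year + horizon_years
--     return _window_sum(list(counts_by_year.items()), lo, hi)
--
--
-- def _window_sum(items, lo, hi):
--     # right fold over the dict's entries: each in-window entry adds its count
--     acc = 0
--     for (y, c) in reversed(items):
--         acc = (c if lo <= y <= hi else 0) + acc
--     return acc
-- ===== Notes on version B (the rewrite author's own statement) =====
-- stated objective: alternative
-- what changed: Instead of iterating over the generated range of window years and probing the dict for each, B recurses structurally over the dict's own entries, adding each count whose year lies in the window; the traversed collection is the present data, not the year range, and the dict lookup disappears.
import Mathlib
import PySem

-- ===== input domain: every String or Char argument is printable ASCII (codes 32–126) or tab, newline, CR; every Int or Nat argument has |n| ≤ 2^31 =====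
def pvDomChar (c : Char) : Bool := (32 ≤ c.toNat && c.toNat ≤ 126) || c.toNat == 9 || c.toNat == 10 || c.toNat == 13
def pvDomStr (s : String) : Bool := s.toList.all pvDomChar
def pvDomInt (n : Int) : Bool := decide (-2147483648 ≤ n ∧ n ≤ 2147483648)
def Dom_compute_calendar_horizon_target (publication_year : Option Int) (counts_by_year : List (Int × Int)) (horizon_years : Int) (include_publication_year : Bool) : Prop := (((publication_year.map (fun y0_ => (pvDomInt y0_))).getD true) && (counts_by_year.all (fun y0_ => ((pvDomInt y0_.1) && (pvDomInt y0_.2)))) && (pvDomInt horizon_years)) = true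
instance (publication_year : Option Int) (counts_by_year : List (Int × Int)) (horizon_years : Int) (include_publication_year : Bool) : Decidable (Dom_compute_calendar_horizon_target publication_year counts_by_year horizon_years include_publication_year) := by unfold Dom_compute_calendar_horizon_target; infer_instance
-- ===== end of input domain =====

-- B recurses over the dict's own entries and adds each in-window count, instead of
-- probing the dict for every year of the generated range; equivalence of the RETURN
-- value proved on dicts with distinct keys.

-- ===== PORT A =====
def compute_calendar_horizon_target (publication_year : Option Int) (counts_by_year : List (Int × Int)) (horizon_years : Int) (include_publication_year : Bool) : Option Int :=
  match publication_year with
  | none => none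
  | some py =>
    if horizon_years < 1 then none
    else
      let start := if include_publication_year then py else py + 1
      let «end» := py + horizon_years
      let total :=
        (PySem.List.pyRange start («end» + 1) 1).foldl
          (fun total y => total + (PySem.Dict.mk counts_by_year).getD y 0) 0
      some total

-- ===== PORT B =====
-- _window_sum: a right fold over the entry list (the reversed loop accumulates
-- contribution + acc), written as the equivalent structural recursion
def pvWindowSum : List (Int × Int) → Int → Int → Int
  | [], _, _ => 0
  | (y, c) :: rest, lo, hi =>
      (if lo ≤ y ∧ y ≤ hi then c else 0) + pvWindowSum rest lo hi

def compute_calendar_horizon_target_alt (publication_year : Option Int) (counts_by_year : List (Int × Int)) (horizon_years : Int) (include_publication_year : Bool) : Option Int :=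
  match publication_year with
  | none => none
  | some py =>
    if horizon_years < 1 then none
    else
      some (pvWindowSum counts_by_year
              (py + (if include_publication_year then 0 else 1))
              (py + horizon_years))

-- ===== PRECONDITION & SPEC =====
-- Pre_ requires distinct keys: the Python argument is a dict, so its association-list
-- representation always has Nodup keys; no input Python A accepts is excluded.
def Pre_compute_calendar_horizon_target (publication_year : Option Int) (counts_by_year : List (Int × Int)) (horizon_years : Int) (include_publication_year : Bool) : Prop :=
  (counts_by_year.map Prod.fst).Nodup
instance (publication_year : Option Int) (counts_by_year : List (Int × Int)) (horizon_years : Int) (include_publication_year : Bool) : Decidable (Pre_compute_calendar_horizon_target publication_year counts_by_year horizon_years include_publication_year) := by unfold Pre_compute_calendar_horizon_target; infer_instance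

def pvWitness_compute_calendar_horizon_target : Option Int × (List (Int × Int)) × Int × Bool :=
  (some 2000, [(2000, 3), (2001, 5), (2004, 2)], 2, true)

def Spec_compute_calendar_horizon_target (publication_year : Option Int) (counts_by_year : List (Int × Int)) (horizon_years : Int) (include_publication_year : Bool) (out : Option Int) : Prop := out = compute_calendar_horizon_target_alt publication_year counts_by_year horizon_years include_publication_year
instance (publication_year : Option Int) (counts_by_year : List (Int × Int)) (horizon_years : Int) (include_publication_year : Bool) (out : Option Int) : Decidable (Spec_compute_calendar_horizon_target publication_year counts_by_year horizon_years include_publication_year out) := by unfold Spec_compute_calendar_horizon_target; infer_instance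

-- ===== CLAIM (what is proved, stated in full; the proofs are below) =====
def Claim_equal_compute_calendar_horizon_target : Prop := ∀ (publication_year : Option Int) (counts_by_year : List (Int × Int)) (horizon_years : Int) (include_publication_year : Bool), Dom_compute_calendar_horizon_target publication_year counts_by_year horizon_years include_publication_year → Pre_compute_calendar_horizon_target publication_year counts_by_year horizon_years include_publication_year → Spec_compute_calendar_horizon_target publication_year counts_by_year horizon_years include_publication_year (compute_calendar_horizon_target publication_year counts_by_year horizon_years include_publication_year)

-- ===== LEMMAS AND PROOFS =====

theorem pv_getD_mk_cons (k v : Int) (rest : List (Int × Int)) (y : Int) :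
    (PySem.Dict.mk ((k, v) :: rest)).getD y 0 = if y = k then v else (PySem.Dict.mk rest).getD y 0 := by
  rw [PySem.Dict.getD_eq_get?_getD, PySem.Dict.getD_eq_get?_getD, PySem.Dict.get?_mk_cons]
  by_cases h : y = k
  · subst h; simp
  · simp [h, Ne.symm h]

theorem pv_getD_not_mem (d : List (Int × Int)) (k : Int) (h : k ∉ d.map Prod.fst) :
    (PySem.Dict.mk d).getD k 0 = 0 := by
  induction d with
  | nil => rfl
  | cons p rest ih =>
    obtain ⟨a, b⟩ := p
    rw [pv_getD_mk_cons]
    simp only [List.map_cons, List.mem_cons, not_or] at h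
    rw [if_neg h.1]
    exact ih h.2

theorem pv_sum_map_ite (r : List Int) (hr : r.Nodup) (k v : Int) (g : Int → Int) :
    (r.map (fun y => if y = k then v else g y)).sum
      = (if k ∈ r then v - g k else 0) + (r.map g).sum := by
  induction r with
  | nil => simp
  | cons a tl ih =>
    simp only [List.nodup_cons] at hr
    simp only [List.map_cons, List.sum_cons, ih hr.2, List.mem_cons]
    by_cases hak : a = k
    · subst hak
      rw [if_pos rfl, if_pos (Or.inl rfl), if_neg hr.1]
      ring
    · rw [if_neg hak]
      by_cases hk : k ∈ tl
      · rw [if_pos hk, if_pos (Or.inr hk)]; ring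
      · rw [if_neg hk, if_neg (fun hmem => by rcases hmem with h | h; exacts [hak h.symm, hk h])]; ring

theorem pv_window_sum (d : List (Int × Int)) (hd : (d.map Prod.fst).Nodup)
    (r : List Int) (hr : r.Nodup) (s e : Int) (hmem : ∀ y, y ∈ r ↔ s ≤ y ∧ y ≤ e) :
    (r.map (fun y => (PySem.Dict.mk d).getD y 0)).sum = pvWindowSum d s e := by
  induction d with
  | nil =>
    have : ∀ y : Int, (PySem.Dict.mk ([] : List (Int × Int))).getD y 0 = 0 := fun y => rfl
    simp [pvWindowSum, this]
  | cons p rest ih =>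
    obtain ⟨k, v⟩ := p
    simp only [List.map_cons, List.nodup_cons] at hd
    have hgd : (r.map (fun y => (PySem.Dict.mk ((k, v) :: rest)).getD y 0)).sum
        = (r.map (fun y => if y = k then v else (PySem.Dict.mk rest).getD y 0)).sum := by
      simp only [pv_getD_mk_cons]
    rw [hgd, pv_sum_map_ite r hr k v _, ih hd.2]
    by_cases hk : k ∈ r
    · have hrange : s ≤ k ∧ k ≤ e := (hmem k).mp hk
      rw [if_pos hk, pv_getD_not_mem rest k hd.1]
      simp only [pvWindowSum, if_pos hrange]
      ring
    · have hrange : ¬ (s ≤ k ∧ k ≤ e) := fun h => hk ((hmem k).mpr h)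
      rw [if_neg hk]
      simp only [pvWindowSum, if_neg hrange]

-- ===== VERDICT (by name: the statement is the Claim_ definition above) =====
theorem compute_calendar_horizon_target_spec : Claim_equal_compute_calendar_horizon_target := by
  intro py cby hy inc _ hpre
  unfold Spec_compute_calendar_horizon_target compute_calendar_horizon_target compute_calendar_horizon_target_alt
  match py with
  | none => rfl
  | some Y =>
    simp only
    by_cases h : hy < 1
    · rw [if_pos h, if_pos h]
    · rw [if_neg h, if_neg h]
      congr 1
      rw [PySem.List.foldl_add]
      rw [pv_window_sum cby hpre _ (PySem.List.nodup_pyRange_one _ _)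
        (Y + (if inc then 0 else 1)) (Y + hy)
        (fun y => by rw [PySem.List.mem_pyRange_one]; split_ifs <;> omega)]
      cases inc <;> simp
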